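-- pv_equiv track=rewrite | github.com/isseis/synology-office-exporter | drive_export.py | get_offline_name
-- ===== SOURCE A (Python) =====
-- from typing import Optional
--
-- def get_offline_name(name: str) -> Optional[str]:
--     """
--     Converts Synology Office file names to Microsoft Office file names.
--
--     File type conversions:
--     - osheet -> xlsx (Excel)
--     - odoc -> docx (Word)
--     - oslides -> pptx (PowerPoint)
--
--     Parameters:
--         name (str): The file name to convert
--
--     Returns:
--         str or None: The file name with corresponding Microsoft Office extension.
--                     Returns None if not a Synology Office file.
--     """
--     extension_mapping = {
--         '.osheet': '.xlsx',
--         '.odoc': '.docx',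
--         '.oslides': '.pptx'
--     }
--     for ext, new_ext in extension_mapping.items():
--         if name.endswith(ext):
--             return name[: -len(ext)] + new_ext
--     return None
-- ===== SOURCE B (Python) =====
-- from typing import Optional
--
-- def get_offline_name(name: str) -> Optional[str]:
--     """Extract the extension once with rfind and do a single dict lookup."""
--     extension_mapping = {
--         '.osheet': '.xlsx',
--         '.odoc': '.docx',
--         '.oslides': '.pptx'
--     }
--     idx = name.rfind('.')
--     new_ext = extension_mapping.get(name[idx:])
--     if new_ext is None:
--         return None
--     return name[:idx] + new_ext
-- ===== Notes on version B (the rewrite author's own statement) =====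
-- stated objective: simpler
-- what changed: Instead of scanning the mapping and testing name.endswith for each key, B extracts the extension once with rfind and a slice and performs a single dict lookup.
import Mathlib
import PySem

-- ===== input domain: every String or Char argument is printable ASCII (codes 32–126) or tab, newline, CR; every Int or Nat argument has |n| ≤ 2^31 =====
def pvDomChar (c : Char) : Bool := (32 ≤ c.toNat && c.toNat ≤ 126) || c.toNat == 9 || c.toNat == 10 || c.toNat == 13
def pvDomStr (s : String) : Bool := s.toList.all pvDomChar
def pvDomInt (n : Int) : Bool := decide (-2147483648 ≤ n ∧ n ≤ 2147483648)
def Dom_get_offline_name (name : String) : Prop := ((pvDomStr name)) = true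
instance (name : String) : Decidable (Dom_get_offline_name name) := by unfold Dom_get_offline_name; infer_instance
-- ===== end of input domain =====

-- B replaces A's linear endswith-scan over the mapping by extracting the extension once
-- (rfind + slice) and doing a single dict lookup; objective: simpler.


-- ===== PORT A =====
-- the literal dict of A
def pvExtMappingA : PySem.Dict String String :=
  ((PySem.Dict.empty.insert ".osheet" ".xlsx").insert ".odoc" ".docx").insert ".oslides" ".pptx"

-- the 'for ext, new_ext in extension_mapping.items()' loop with early return
def pvALoop (name : String) : List (String × String) → Option String
  | [] => none
  | (ext, newExt) :: rest =>
      if PySem.Str.endswith name ext then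
        some (String.ofList (PySem.List.slice name.toList none (some (-(PySem.Str.len ext))) ++ newExt.toList))
      else pvALoop name rest

def get_offline_name (name : String) : Option String :=
  pvALoop name pvExtMappingA.items

-- ===== PORT B =====
def pvExtMappingB : PySem.Dict String String :=
  ((PySem.Dict.empty.insert ".osheet" ".xlsx").insert ".odoc" ".docx").insert ".oslides" ".pptx"

-- the body after 'idx = name.rfind('.')': one dict lookup, then splice
def pvBFinish (name : String) (idx : Int) : Option String :=
  match pvExtMappingB.get? (String.ofList (PySem.List.slice name.toList (some idx) none)) with
  | none => none
  | some newExt => some (String.ofList (PySem.List.slice name.toList none (some idx) ++ newExt.toList))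

def get_offline_name_alt (name : String) : Option String :=
  pvBFinish name (PySem.Str.rfind name ".")

-- ===== PRECONDITION & SPEC =====
def Spec_get_offline_name (name : String) (out : Option String) : Prop := out = get_offline_name_alt name
instance (name : String) (out : Option String) : Decidable (Spec_get_offline_name name out) := by unfold Spec_get_offline_name; infer_instance

-- ===== CLAIM (what is proved, stated in full; the proofs are below) =====
def Claim_equal_get_offline_name : Prop := ∀ (name : String), Dom_get_offline_name name → Spec_get_offline_name name (get_offline_name name)

-- ===== LEMMAS AND PROOFS =====

-- [c].isPrefixOf l tests exactly the head
lemma pv_singleton_isPrefixOf (c : Char) (l : List Char) :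
    [c].isPrefixOf l = true ↔ l.head? = some c := by
  cases l with
  | nil => simp [List.isPrefixOf]
  | cons x xs =>
      simp only [List.isPrefixOf, List.head?, Option.some.injEq, Bool.and_eq_true, beq_iff_eq]
      constructor
      · rintro ⟨h, _⟩; exact h.symm
      · intro h; exact ⟨h.symm, by simp⟩

-- rfind.go returns the HIGHEST match position
lemma pv_rfind_go_eq (s : List Char) (k : Nat)
    (hk : [('.' : Char)].isPrefixOf (s.drop k) = true)
    (hj : ∀ j : Nat, k < j → ¬ [('.' : Char)].isPrefixOf (s.drop j) = true) :
    ∀ i : Nat, k ≤ i → PySem.Chars.rfind.go s ['.'] i = (k : Int) := by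
  intro i
  induction i with
  | zero =>
      intro h
      have hk0 : k = 0 := Nat.le_zero.mp h
      subst hk0
      simp only [PySem.Chars.rfind.go]
      simp only [List.drop_zero] at hk
      simp [hk]
  | succ n ih =>
      intro h
      rcases Nat.lt_or_ge n k with hlt | hge
      · -- k = n + 1
        have hkeq : k = n + 1 := by omega
        subst hkeq
        simp only [PySem.Chars.rfind.go]
        simp [hk]
      · -- k ≤ n : position n+1 cannot match
        have hnm := hj (n + 1) (by omega)
        simp only [PySem.Chars.rfind.go]
        simp only [Bool.not_eq_true] at hnm
        simp [hnm, ih hge]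

-- last '.' of pre ++ '.' :: rest is at pre.length when rest has no dot
lemma pv_rfind_append (pre rest : List Char) (hnd : ('.' : Char) ∉ rest) :
    PySem.Chars.rfind (pre ++ '.' :: rest) ['.'] = (pre.length : Int) := by
  apply pv_rfind_go_eq
  · rw [pv_singleton_isPrefixOf]
    rw [List.drop_left]
    rfl
  · intro j hjk hpref
    rw [pv_singleton_isPrefixOf, List.head?_drop] at hpref
    rw [List.getElem?_append_right (by omega)] at hpref
    rcases Nat.exists_eq_add_of_lt hjk with ⟨m, hm⟩
    have : (('.' : Char) :: rest)[j - pre.length]? = rest[j - pre.length - 1]? := by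
      have : j - pre.length = (j - pre.length - 1) + 1 := by omega
      rw [this]; simp
    rw [this] at hpref
    exact hnd (List.mem_of_getElem? hpref)
  · simp

-- the items of A's literal dict
lemma pv_itemsA : pvExtMappingA.items =
    [(".osheet", ".xlsx"), (".odoc", ".docx"), (".oslides", ".pptx")] := by decide

-- lookup in B's literal dict, characterized
lemma pv_getB (k : String) :
    pvExtMappingB.get? k =
      if ".osheet" = k then some ".xlsx"
      else if ".odoc" = k then some ".docx"
      else if ".oslides" = k then some ".pptx"
      else none := by
  have h : pvExtMappingB = PySem.Dict.mk
      [(".osheet", ".xlsx"), (".odoc", ".docx"), (".oslides", ".pptx")] := by decide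
  rw [h]
  simp only [PySem.Dict.get?_mk_cons, beq_iff_eq]
  have h2 : (PySem.Dict.mk ([] : List (String × String))).get? k = none := by
    simp [PySem.Dict.get?]
  rw [h2]

-- one matched-extension case, done generically: name = pre ++ ext where ext = '.'::tail, no dot in tail
lemma pv_matched (name : String) (pre tail : List Char) (newExt : String)
    (hnd : ('.' : Char) ∉ tail)
    (hname : name.toList = pre ++ '.' :: tail)
    (hget : pvExtMappingB.get? (String.ofList ('.' :: tail)) = some newExt) :
    get_offline_name_alt name =
      some (String.ofList (pre ++ newExt.toList)) := by
  unfold get_offline_name_alt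
  have hidx : PySem.Str.rfind name "." = (pre.length : Int) := by
    simp only [PySem.Str.rfind]
    rw [hname]
    exact pv_rfind_append pre tail hnd
  rw [hidx]
  unfold pvBFinish
  rw [hname]
  rw [PySem.List.slice_from_natCast, List.drop_left]
  rw [hget]
  rw [PySem.List.slice_to_natCast, List.take_left]

-- A's branch value for a matched extension equals B's
lemma pv_a_branch (name : String) (pre tail : List Char) (newExt : String)
    (hname : name.toList = pre ++ '.' :: tail) :
    PySem.List.slice name.toList none (some (-(1 + (tail.length : Int)))) ++ newExt.toList
      = pre ++ newExt.toList := by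
  rw [hname]
  have h1 : -(1 + (tail.length : Int)) = -(((1 + tail.length : Nat) : Int)) := by push_cast; ring
  rw [h1, PySem.List.slice_to_neg_natCast (pre ++ '.' :: tail) (1 + tail.length) (by omega)]
  congr 1
  have : (pre ++ '.' :: tail).length - (1 + tail.length) = pre.length := by
    simp; omega
  rw [this]
  exact List.take_left' rfl

-- no-match case: the extracted extension is a suffix of name, so it is none of the keys
lemma pv_unmatched (name : String)
    (h1 : ¬ PySem.Str.endswith name ".osheet" = true)
    (h2 : ¬ PySem.Str.endswith name ".odoc" = true)
    (h3 : ¬ PySem.Str.endswith name ".oslides" = true) :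
    get_offline_name_alt name = none := by
  unfold get_offline_name_alt pvBFinish
  have hsuf : PySem.List.slice name.toList (some (PySem.Str.rfind name "."))
      none <:+ name.toList := by
    rw [PySem.List.slice_some_none]
    exact List.drop_suffix _ _
  have hne : ∀ t : String, ¬ PySem.Str.endswith name t = true →
      ¬ (t = String.ofList (PySem.List.slice name.toList (some (PySem.Str.rfind name ".")) none)) := by
    intro t ht heq
    replace heq := heq.symm
    apply ht
    simp only [PySem.Str.endswith_eq]
    rw [PySem.Chars.endswith_iff]
    have : t.toList = PySem.List.slice name.toList (some (PySem.Str.rfind name ".")) none := by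
      rw [← heq, String.toList_ofList]
    rw [this]
    exact hsuf
  rw [pv_getB]
  rw [if_neg (hne _ h1), if_neg (hne _ h2), if_neg (hne _ h3)]

-- ===== VERDICT (by name: the statement is the Claim_ definition above) =====
theorem get_offline_name_spec : Claim_equal_get_offline_name := by
  intro name _
  unfold Spec_get_offline_name
  unfold get_offline_name
  rw [pv_itemsA]
  by_cases h1 : PySem.Str.endswith name ".osheet" = true
  · obtain ⟨pre, hpre⟩ : ".osheet".toList <:+ name.toList := by
      rw [← PySem.Chars.endswith_iff]; simpa using h1
    have hname : name.toList = pre ++ '.' :: "osheet".toList := by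
      rw [← hpre]; rfl
    simp only [pvALoop, h1, if_pos]
    rw [pv_matched name pre "osheet".toList ".xlsx" (by decide) hname (by decide)]
    have : PySem.Str.len ".osheet" = 1 + ("osheet".toList.length : Int) := by decide
    rw [this, pv_a_branch name pre "osheet".toList ".xlsx" hname]
  · by_cases h2 : PySem.Str.endswith name ".odoc" = true
    · obtain ⟨pre, hpre⟩ : ".odoc".toList <:+ name.toList := by
        rw [← PySem.Chars.endswith_iff]; simpa using h2
      have hname : name.toList = pre ++ '.' :: "odoc".toList := by
        rw [← hpre]; rfl
      simp only [pvALoop, h1, h2, if_pos, if_neg, Bool.not_eq_true]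
      rw [pv_matched name pre "odoc".toList ".docx" (by decide) hname (by decide)]
      have : PySem.Str.len ".odoc" = 1 + ("odoc".toList.length : Int) := by decide
      rw [this, pv_a_branch name pre "odoc".toList ".docx" hname]
    · by_cases h3 : PySem.Str.endswith name ".oslides" = true
      · obtain ⟨pre, hpre⟩ : ".oslides".toList <:+ name.toList := by
          rw [← PySem.Chars.endswith_iff]; simpa using h3
        have hname : name.toList = pre ++ '.' :: "oslides".toList := by
          rw [← hpre]; rfl
        simp only [pvALoop, h1, h2, h3, if_pos, if_neg, Bool.not_eq_true]
        rw [pv_matched name pre "oslides".toList ".pptx" (by decide) hname (by decide)]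
        have : PySem.Str.len ".oslides" = 1 + ("oslides".toList.length : Int) := by decide
        rw [this, pv_a_branch name pre "oslides".toList ".pptx" hname]
      · simp only [pvALoop, h1, h2, h3, if_neg, Bool.not_eq_true]
        rw [pv_unmatched name h1 h2 h3]
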